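-- pv_equiv track=rewrite | github.com/AiRanthem/LintCode | Python/2020南京大学软件学院夏令营模拟考试/切开字符串.py | genSide
-- ===== SOURCE A (Python) =====
-- def isPositive(string: str) -> bool:
--     return len(string) % 2 and string == string[::-1]
--
-- def genSide(string: str, left: bool) -> list:
--     """
--     生成一侧的数字，放在arr中。arr[i]为分割点为i时满足的
--     @param left: 方向，1为左侧，0为右侧
--     @param string: 要分割的字符串
--     @return: 列表arr，arr[i]为从左或右端起，到 第i个 字符所满足条件的字串个数（左为
--     """
--     arr = []
--     substr_set = set()
--     if not left:
--         string = string[::-1]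
--     for i in range(len(string)):
--         j = i
--         while j >= 0:
--             test = string[j:i + 1]
--             if isPositive(test) == left:
--                 substr_set.add(test)
--             j = j - 1 - left
--         arr.append(len(substr_set))
--     return arr if left else arr[::-1]
-- ===== SOURCE B (Python) =====
-- def genSide(string: str, left: bool) -> list:
--     # Incremental "count only the new" algorithm: no set of seen substrings at all.
--     # left: when a character is appended, at most ONE new distinct odd palindrome
--     # can appear -- the longest odd palindromic suffix (any shorter odd palindromic
--     # suffix is also a prefix of it, so it occurred earlier); count it if it does
--     # not already occur in the preceding prefix.
--     # right: when a character is prepended to the suffix, the new distinct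
--     # substrings are exactly the prefixes longer than the longest prefix that
--     # reoccurs at a later start; count the non-odd-palindromes among them.
--     n = len(string)
--     if left:
--         arr = []
--         total = 0
--         for i in range(n):
--             L = i + 1 if (i + 1) % 2 == 1 else i
--             while string[i + 1 - L:i + 1] != string[i + 1 - L:i + 1][::-1]:
--                 L -= 2
--             if string[i + 1 - L:i + 1] not in string[:i]:
--                 total += 1
--             arr.append(total)
--         return arr
--     else:
--         arr = [0] * n
--         total = 0
--         for k in range(n - 1, -1, -1):
--             m = 0
--             while k + m < n and string[k:k + m + 1] in string[k + 1:]: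
--                 m += 1
--             for q in range(m + 1, n - k + 1):
--                 t = string[k:k + q]
--                 if q % 2 == 0 or t != t[::-1]:
--                     total += 1
--             arr[k] = total
--         return arr
-- ===== Notes on version B (the rewrite author's own statement) =====
-- stated objective: alternative
-- what changed: B keeps no set of seen substrings at all: it counts only the NEW distinct substrings of each step, using the eertree fact that appending a character adds at most one new odd palindrome (its longest odd palindromic suffix, tested for novelty by a substring search in the preceding prefix) on the left, and the fact that prepending a character adds exactly the prefixes longer than the longest prefix that reoccurs at a later start on the right.
import Mathlib
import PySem

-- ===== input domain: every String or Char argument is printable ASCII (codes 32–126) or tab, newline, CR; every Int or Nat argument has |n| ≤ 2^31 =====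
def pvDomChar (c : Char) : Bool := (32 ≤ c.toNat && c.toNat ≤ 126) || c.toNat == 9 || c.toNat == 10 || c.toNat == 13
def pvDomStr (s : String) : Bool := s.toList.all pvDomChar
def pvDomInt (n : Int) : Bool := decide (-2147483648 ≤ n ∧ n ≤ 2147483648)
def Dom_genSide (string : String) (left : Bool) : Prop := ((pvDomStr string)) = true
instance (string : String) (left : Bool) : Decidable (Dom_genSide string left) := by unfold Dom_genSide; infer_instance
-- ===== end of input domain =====

-- B replaces A's grow-a-set-of-all-substrings scan by an incremental count of only
-- the NEW distinct substrings per step (the longest odd palindromic suffix on the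
-- left; the prefixes past the longest reoccurring prefix on the right), with no set
-- at all (objective: alternative).

-- ===== PORT A =====
-- xs[::-1] (slice with step -1; total since the step is nonzero)
def pyRevL {α : Type} (xs : List α) : List α := (PySem.List.slice? xs none none (-1)).getD []

-- len(string) % 2 and string == string[::-1], used as a boolean
def isPositive (t : List Char) : Bool := (t.length % 2 != 0) && (t == pyRevL t)

-- the inner 'while j >= 0' loop of A
def genSideWhile (s : List Char) (left : Bool) (i : Nat) (j : Int)
    (st : PySem.Set (List Char)) : PySem.Set (List Char) :=
  if 0 ≤ j then
    let test := PySem.List.slice s (some j) (some ((i : Int) + 1))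
    let st' := if isPositive test == left then PySem.Set.add st test else st
    genSideWhile s left i (j - 1 - (if left then 1 else 0)) st'
  else st
termination_by (j + 1).toNat
decreasing_by cases left <;> simp <;> omega

def genSide (string : String) (left : Bool) : List Int :=
  let s0 := string.toList
  let s := if !left then pyRevL s0 else s0
  let res := (List.range s.length).foldl
    (fun (st : PySem.Set (List Char) × List Int) i =>
      let s1 := genSideWhile s left i (i : Int) st.1
      (s1, st.2 ++ [(s1.length : Int)]))
    (PySem.Set.empty, [])
  if left then res.2 else pyRevL res.2

-- ===== PORT B =====
-- Python's 'L = i + 1 if (i + 1) % 2 == 1 else i'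
def lInit (i : Nat) : Nat := if (i + 1) % 2 == 1 then i + 1 else i

-- B's left inner while loop: decrease L by 2 until string[i+1-L:i+1] is a palindrome
-- (the '2 ≤ L' guard only makes the recursion total; when the palindrome test fails
-- it always holds, since at L = 1 the slice is a one-character palindrome)
def bFindL (s : List Char) (i : Nat) (L : Nat) : Nat :=
  if ¬ PySem.List.slice s (some ((i : Int) + 1 - (L : Int))) (some ((i : Int) + 1)) =
      pyRevL (PySem.List.slice s (some ((i : Int) + 1 - (L : Int))) (some ((i : Int) + 1))) ∧ 2 ≤ L
  then bFindL s i (L - 2) else L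
termination_by L
decreasing_by omega

-- B's right inner while loop: grow m while string[k:k+m+1] occurs in string[k+1:]
def bWhileR (s : List Char) (k : Nat) (m : Nat) : Nat :=
  if h : k + m < s.length ∧ PySem.Chars.isIn
      (PySem.List.slice s (some (k : Int)) (some ((k : Int) + (m : Int) + 1)))
      (PySem.List.slice s (some ((k : Int) + 1)) none) = true then
    bWhileR s k (m + 1)
  else m
termination_by s.length - (k + m)
decreasing_by omega

-- one iteration of B's left for-loop (state: running total, arr)
def stepBL (s : List Char) (st : Int × List Int) (i : Nat) : Int × List Int :=
  let L := bFindL s i (lInit i)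
  let t := PySem.List.slice s (some ((i : Int) + 1 - (L : Int))) (some ((i : Int) + 1))
  let total := if PySem.Chars.isIn t (PySem.List.slice s none (some (i : Int))) = true
    then st.1 else st.1 + 1
  (total, st.2 ++ [total])

-- one iteration of B's right for-loop (state: running total, arr)
def stepBR (s : List Char) (st : Int × List Int) (k : Nat) : Int × List Int :=
  let m := bWhileR s k 0
  let total := (PySem.List.pyRange ((m : Int) + 1) ((s.length : Int) - (k : Int) + 1) 1).foldl
    (fun tot q =>
      if (PySem.Int.mod q 2 == 0 ||
          !(PySem.List.slice s (some (k : Int)) (some ((k : Int) + q)) ==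
            pyRevL (PySem.List.slice s (some (k : Int)) (some ((k : Int) + q))))) = true
      then tot + 1 else tot) st.1
  (total, st.2.set k total)

def genSide_alt (string : String) (left : Bool) : List Int :=
  let s := string.toList
  if left then
    ((List.range s.length).foldl (stepBL s) (0, [])).2
  else
    ((List.range s.length).reverse.foldl (stepBR s) (0, List.replicate s.length (0 : Int))).2

-- ===== PRECONDITION & SPEC =====
def Spec_genSide (string : String) (left : Bool) (out : List Int) : Prop := out = genSide_alt string left
instance (string : String) (left : Bool) (out : List Int) : Decidable (Spec_genSide string left out) := by unfold Spec_genSide; infer_instance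

-- ===== CLAIM (what is proved, stated in full; the proofs are below) =====
def Claim_equal_genSide : Prop := ∀ (string : String) (left : Bool), Dom_genSide string left → Spec_genSide string left (genSide string left)

-- ===== LEMMAS AND PROOFS =====

-- pyRevL is List.reverse (Python's xs[::-1])
theorem pyRevL_eq {α : Type} (xs : List α) : pyRevL xs = xs.reverse := by
  simp [pyRevL, PySem.List.slice?_none_none_neg_one]

theorem isPositive_eq (t : List Char) :
    isPositive t = ((t.length % 2 != 0) && (t == t.reverse)) := by
  rw [isPositive, pyRevL_eq]

theorem isPositive_reverse (t : List Char) : isPositive t.reverse = isPositive t := by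
  simp only [isPositive_eq, List.length_reverse, List.reverse_reverse]
  have : (t.reverse == t) = (t == t.reverse) := by
    rw [Bool.eq_iff_iff]; simp only [beq_iff_eq]; exact ⟨Eq.symm, Eq.symm⟩
  rw [this]

-- Python's 'len(t) % 2 and t == t[::-1]' as a single Bool
def oddPalB (x : List Char) : Bool := (x.length % 2 == 1) && (x == x.reverse)

theorem oddPalB_iff (x : List Char) : oddPalB x = true ↔ x.length % 2 = 1 ∧ x = x.reverse := by
  simp [oddPalB]

theorem isPositive_eq_oddPalB (t : List Char) : isPositive t = oddPalB t := by
  rw [isPositive_eq, oddPalB]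
  rcases Nat.mod_two_eq_zero_or_one t.length with h | h <;> simp [h]

-- substring of s starting at a, width w  (s[a : a+w])
def segN (s : List Char) (a w : Nat) : List Char := (s.drop a).take w

theorem length_segN (s : List Char) (a w : Nat) (h : a + w ≤ s.length) :
    (segN s a w).length = w := by
  simp [segN]; omega

theorem slice_eq_segN (s : List Char) (a b : Int) (h0 : 0 ≤ a) (h1 : 0 ≤ b) :
    PySem.List.slice s (some a) (some b) = segN s a.toNat (b.toNat - a.toNat) := by
  rw [PySem.List.slice_toNat s h0 h1]; rfl

theorem segN_reverse (s : List Char) (a w : Nat) (h : a + w ≤ s.length) :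
    (segN s.reverse a w).reverse = segN s (s.length - a - w) w := by
  unfold segN
  rw [List.drop_reverse, List.take_reverse, List.reverse_reverse, List.drop_take]
  have h1 : (s.take (s.length - a)).length = s.length - a := by simp
  rw [h1]
  congr 1
  omega

-- two Nodup lists with the same members have the same length
theorem length_eq_of_mem_iff {α : Type} [DecidableEq α] {l₁ l₂ : List α}
    (h₁ : l₁.Nodup) (h₂ : l₂.Nodup) (h : ∀ x, x ∈ l₁ ↔ x ∈ l₂) : l₁.length = l₂.length :=
  ((List.perm_ext_iff_of_nodup h₁ h₂).2 h).length_eq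

-- … and the same with members related by reversal
theorem length_eq_of_mem_rev_iff {l₁ l₂ : List (List Char)}
    (h₁ : l₁.Nodup) (h₂ : l₂.Nodup) (h : ∀ x, x ∈ l₁ ↔ x.reverse ∈ l₂) :
    l₁.length = l₂.length := by
  have hmap : (l₁.map List.reverse).Nodup :=
    h₁.map (fun hab => by simpa using congrArg List.reverse hab)
  have := length_eq_of_mem_iff hmap h₂ (fun y => by
    simp only [List.mem_map]
    constructor
    · rintro ⟨x, hx, rfl⟩; exact (h x).1 hx
    · intro hy; exact ⟨y.reverse, (h y.reverse).2 (by simpa), by simp⟩)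
  simpa using this

-- canonical description of the strings A inserts at a LEFT step with end index i
def QL (s : List Char) (i : Nat) (x : List Char) : Prop :=
  ∃ a : Nat, a ≤ i ∧ (i - a) % 2 = 0 ∧ (x == x.reverse) = true ∧ x = segN s a (i + 1 - a)

-- canonical description of the strings A inserts at a RIGHT step with start index k
def QR (s : List Char) (k : Nat) (x : List Char) : Prop :=
  ∃ m : Nat, k < m ∧ m ≤ s.length ∧ isPositive x = false ∧ x = segN s k (m - k)

-- the semantic predicates the equivalence proof revolves around
def SufQ (s : List Char) (i : Nat) (x : List Char) : Prop :=
  x ≠ [] ∧ oddPalB x = true ∧ x <:+ s.take (i + 1)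
def SubL (s : List Char) (r : Nat) (x : List Char) : Prop :=
  x ≠ [] ∧ oddPalB x = true ∧ x <:+: s.take r
def PreQ (s : List Char) (k : Nat) (x : List Char) : Prop :=
  x ≠ [] ∧ oddPalB x = false ∧ x <+: s.drop k
def SubR (s : List Char) (k : Nat) (x : List Char) : Prop :=
  x ≠ [] ∧ oddPalB x = false ∧ x <:+: s.drop k

-- A's while loop: membership and Nodup
theorem genSideWhile_spec (s : List Char) (left : Bool) (i : Nat) :
    ∀ (fuel : Nat) (j : Int) (st : PySem.Set (List Char)), (j + 1).toNat ≤ fuel → st.Nodup →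
      (genSideWhile s left i j st).Nodup ∧
      (∀ x, x ∈ genSideWhile s left i j st ↔ x ∈ st ∨ ∃ jj : Int, 0 ≤ jj ∧ jj ≤ j ∧
          (left = true → (j - jj) % 2 = 0) ∧
          (isPositive (PySem.List.slice s (some jj) (some ((i : Int) + 1))) == left) = true ∧
          x = PySem.List.slice s (some jj) (some ((i : Int) + 1))) := by
  intro fuel
  induction fuel with
  | zero =>
    intro j st hf hst
    have hj : ¬ (0 ≤ j) := by omega
    rw [genSideWhile, if_neg hj]
    refine ⟨hst, fun x => ?_⟩
    constructor
    · intro hx; exact Or.inl hx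
    · rintro (hx | ⟨jj, h0, h1, _⟩)
      · exact hx
      · omega
  | succ f IH =>
    intro j st hf hst
    by_cases hj : 0 ≤ j
    · rw [genSideWhile, if_pos hj]
      set t := PySem.List.slice s (some j) (some ((i : Int) + 1)) with ht
      set c : Int := (if left then 1 else 0) with hc
      have hcd : (left = true ∧ c = 1) ∨ (left = false ∧ c = 0) := by
        cases left <;> simp [hc]
      set st' := (if (isPositive t == left) = true then PySem.Set.add st t else st) with hst'
      have hst'n : st'.Nodup := by
        rw [hst']; split
        · exact PySem.Set.nodup_add st t hst
        · exact hst
      have hf' : (j - 1 - c + 1).toNat ≤ f := by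
        rcases hcd with ⟨_, h⟩ | ⟨_, h⟩ <;> rw [h] <;> omega
      obtain ⟨hn, hm⟩ := IH (j - 1 - c) st' hf' hst'n
      refine ⟨hn, fun x => ?_⟩
      rw [hm x]
      constructor
      · rintro (hx | ⟨jj, h0, h1, h2, h3, h4⟩)
        · by_cases hp : (isPositive t == left) = true
          · rw [hst', if_pos hp] at hx
            rcases (PySem.Set.mem_add st t x).1 hx with hx' | rfl
            · exact Or.inl hx'
            · exact Or.inr ⟨j, hj, le_refl j, fun _ => by omega, hp, ht⟩
          · rw [hst', if_neg hp] at hx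
            exact Or.inl hx
        · refine Or.inr ⟨jj, h0, ?_, ?_, h3, h4⟩
          · rcases hcd with ⟨_, h⟩ | ⟨_, h⟩ <;> rw [h] at h1 <;> omega
          · intro hl
            rcases hcd with ⟨_, h⟩ | ⟨hl', _⟩
            · have h2' := h2 hl; rw [h] at h2'; omega
            · rw [hl] at hl'; exact absurd hl' (by simp)
      · rintro (hx | ⟨jj, h0, h1, h2, h3, h4⟩)
        · left
          by_cases hp : (isPositive t == left) = true
          · rw [hst', if_pos hp]; exact ((PySem.Set.mem_add st t x).2 (Or.inl hx))
          · rw [hst', if_neg hp]; exact hx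
        · by_cases hjj : jj = j
          · subst hjj
            left
            rw [← ht] at h3 h4
            rw [hst', if_pos h3]
            exact (PySem.Set.mem_add st t x).2 (Or.inr h4)
          · refine Or.inr ⟨jj, h0, ?_, ?_, h3, h4⟩
            · rcases hcd with ⟨hl, h⟩ | ⟨_, h⟩
              · have h2' := h2 hl; rw [h]; omega
              · rw [h]; omega
            · intro hl
              rcases hcd with ⟨_, h⟩ | ⟨hl', _⟩
              · have h2' := h2 hl; rw [h]; omega
              · rw [hl] at hl'; exact absurd hl' (by simp)
    · rw [genSideWhile, if_neg hj]
      refine ⟨hst, fun x => ?_⟩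
      constructor
      · intro hx; exact Or.inl hx
      · rintro (hx | ⟨jj, h0, h1, _⟩)
        · exact hx
        · omega

-- A's while loop only appends to the set
theorem genSideWhile_append (s : List Char) (left : Bool) (i : Nat) :
    ∀ (fuel : Nat) (j : Int) (st : PySem.Set (List Char)), (j + 1).toNat ≤ fuel →
      ∃ ex, genSideWhile s left i j st = st ++ ex := by
  intro fuel
  induction fuel with
  | zero =>
    intro j st hf
    rw [genSideWhile, if_neg (by omega : ¬ (0 : Int) ≤ j)]
    exact ⟨[], by simp⟩
  | succ f IH =>
    intro j st hf
    by_cases hj : 0 ≤ j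
    · rw [genSideWhile, if_pos hj]
      set t := PySem.List.slice s (some j) (some ((i : Int) + 1)) with ht
      set c : Int := (if left then 1 else 0) with hc
      have hf' : (j - 1 - c + 1).toNat ≤ f := by cases left <;> simp [hc] <;> omega
      show ∃ ex, genSideWhile s left i (j - 1 - c)
          (if (isPositive t == left) = true then PySem.Set.add st t else st) = st ++ ex
      by_cases hp : (isPositive t == left) = true
      · rw [if_pos hp]
        by_cases hm : PySem.Set.contains st t = true
        · have hadd : PySem.Set.add st t = st := by
            simp [PySem.Set.add]
            exact (PySem.Set.contains_iff st t).mp hm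
          rw [hadd]; exact IH _ _ hf'
        · have hadd : PySem.Set.add st t = st ++ [t] := by
            simp [PySem.Set.add]
            exact fun hmem => hm ((PySem.Set.contains_iff st t).mpr hmem)
          rw [hadd]
          obtain ⟨ex, hex⟩ := IH (j - 1 - c) (st ++ [t]) hf'
          exact ⟨[t] ++ ex, by rw [hex, List.append_assoc]⟩
      · rw [if_neg hp]; exact IH _ _ hf'
    · rw [genSideWhile, if_neg hj]; exact ⟨[], by simp⟩

-- A's LEFT step inserts exactly QL s i
theorem stepA_left_mem (s : List Char) (i : Nat) (hi : i < s.length) (x : List Char) :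
    (∃ jj : Int, 0 ≤ jj ∧ jj ≤ (i : Int) ∧
        ((i : Int) - jj) % 2 = 0 ∧
        (isPositive (PySem.List.slice s (some jj) (some ((i : Int) + 1))) == true) = true ∧
        x = PySem.List.slice s (some jj) (some ((i : Int) + 1))) ↔ QL s i x := by
  constructor
  · rintro ⟨jj, h0, h1, h2, h3, h4⟩
    refine ⟨jj.toNat, by omega, by omega, ?_, ?_⟩
    · have hs : PySem.List.slice s (some jj) (some ((i : Int) + 1)) =
          segN s jj.toNat (i + 1 - jj.toNat) := by
        rw [slice_eq_segN s jj ((i : Int) + 1) h0 (by omega)]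
        congr 1
      rw [hs] at h3 h4
      have hlen : (segN s jj.toNat (i + 1 - jj.toNat)).length = i + 1 - jj.toNat :=
        length_segN s _ _ (by omega)
      rw [isPositive_eq, hlen] at h3
      have hodd : ((i + 1 - jj.toNat) % 2 != 0) = true := by
        simp only [bne_iff_ne, ne_eq]; omega
      rw [← h4] at h3
      simpa [hodd] using h3
    · rw [h4, slice_eq_segN s jj ((i : Int) + 1) h0 (by omega)]
      congr 1
  · rintro ⟨a, h0, h1, h2, h3⟩
    refine ⟨(a : Int), by omega, by omega, by omega, ?_, ?_⟩
    · have hs : PySem.List.slice s (some (a : Int)) (some ((i : Int) + 1)) =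
          segN s a (i + 1 - a) := by
        rw [slice_eq_segN s _ _ (by omega) (by omega)]
        congr 1
      rw [hs, ← h3]
      have hlen : x.length = i + 1 - a := h3 ▸ length_segN s _ _ (by omega)
      rw [isPositive_eq, hlen]
      have hodd : ((i + 1 - a) % 2 != 0) = true := by
        simp only [bne_iff_ne, ne_eq]; omega
      simp [hodd, h2]
    · rw [h3, slice_eq_segN s _ _ (by omega) (by omega)]
      congr 1

-- A's RIGHT step (running on s.reverse) inserts exactly the reversals of QR s (s.length-1-i)
theorem stepA_right_mem (s : List Char) (i : Nat) (hi : i < s.length) (x : List Char) :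
    (∃ jj : Int, 0 ≤ jj ∧ jj ≤ (i : Int) ∧
        (isPositive (PySem.List.slice s.reverse (some jj) (some ((i : Int) + 1))) == false) = true ∧
        x = PySem.List.slice s.reverse (some jj) (some ((i : Int) + 1))) ↔
      QR s (s.length - 1 - i) x.reverse := by
  have hrev : ∀ a : Nat, a ≤ i →
      (segN s.reverse a (i + 1 - a)).reverse = segN s (s.length - 1 - i) (s.length - a - (s.length - 1 - i)) := by
    intro a ha
    have := segN_reverse s a (i + 1 - a) (by omega)
    rw [this]
    congr 1 <;> omega
  constructor
  · rintro ⟨jj, h0, h1, h3, h4⟩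
    have hs : PySem.List.slice s.reverse (some jj) (some ((i : Int) + 1)) =
        segN s.reverse jj.toNat (i + 1 - jj.toNat) := by
      rw [slice_eq_segN s.reverse jj ((i : Int) + 1) h0 (by omega)]
      congr 1
    rw [hs] at h3 h4
    refine ⟨s.length - jj.toNat, by omega, by omega, ?_, ?_⟩
    · rw [h4, isPositive_reverse]
      simpa using h3
    · rw [h4, hrev jj.toNat (by omega)]
  · rintro ⟨m, h0, h1, h2, h3⟩
    have ha : s.length - m ≤ i := by omega
    have hx : x = segN s.reverse (s.length - m) (i + 1 - (s.length - m)) := by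
      have h5 := hrev (s.length - m) ha
      have h6 : s.length - (s.length - m) - (s.length - 1 - i) = m - (s.length - 1 - i) := by omega
      rw [h6] at h5
      rw [← h3] at h5
      calc x = x.reverse.reverse := by simp
        _ = (segN s.reverse (s.length - m) (i + 1 - (s.length - m))).reverse.reverse := by rw [h5]
        _ = _ := by simp
    refine ⟨((s.length - m : Nat) : Int), by omega, by omega, ?_, ?_⟩
    · have hs : PySem.List.slice s.reverse (some ((s.length - m : Nat) : Int)) (some ((i : Int) + 1)) =
          segN s.reverse (s.length - m) (i + 1 - (s.length - m)) := by
        rw [slice_eq_segN s.reverse _ _ (by omega) (by omega)]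
        congr 1
      rw [hs, ← hx]
      have : isPositive x = false := (isPositive_reverse x).symm.trans h2
      simp [this]
    · rw [slice_eq_segN s.reverse _ _ (by omega) (by omega), hx]
      congr 1

-- the suffix of s.take (i+1) of length L
def TfL (s : List Char) (i L : Nat) : List Char := (s.take (i + 1)).drop (i + 1 - L)

theorem slice_TfL (s : List Char) (i L : Nat) (hL : L ≤ i + 1) :
    PySem.List.slice s (some ((i : Int) + 1 - (L : Int))) (some ((i : Int) + 1)) = TfL s i L := by
  rw [show (i : Int) + 1 - (L : Int) = ((i + 1 - L : Nat) : Int) from by omega,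
    show (i : Int) + 1 = ((i + 1 : Nat) : Int) from by omega,
    PySem.List.slice_natCast]
  unfold TfL
  rw [List.drop_take]

theorem TfL_length (s : List Char) (i L : Nat) (hi : i < s.length) (hL : L ≤ i + 1) :
    (TfL s i L).length = L := by
  unfold TfL; simp; omega

theorem suffix_eq_TfL (s : List Char) (i : Nat) (hi : i < s.length) (x : List Char)
    (hx : x <:+ s.take (i + 1)) : x = TfL s i x.length := by
  obtain ⟨pre, hpre⟩ := hx
  have hlen : pre.length + x.length = i + 1 := by
    have h := congrArg List.length hpre
    simp at h
    omega
  have hdrop : (s.take (i + 1)).drop pre.length = x := by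
    rw [← hpre, List.drop_left]
  unfold TfL
  rw [show i + 1 - x.length = pre.length from by omega, hdrop]

theorem QL_iff (s : List Char) (i : Nat) (hi : i < s.length) (x : List Char) :
    QL s i x ↔ SufQ s i x := by
  constructor
  · rintro ⟨a, ha, hpar, hpal, hxe⟩
    have hlen : x.length = i + 1 - a := by rw [hxe]; exact length_segN s a _ (by omega)
    have hseg : x = (s.take (i + 1)).drop a := by rw [hxe, segN, List.drop_take]
    refine ⟨?_, ?_, hseg ▸ List.drop_suffix a (s.take (i + 1))⟩
    · intro h; rw [h] at hlen; simp at hlen; omega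
    · rw [oddPalB_iff]
      exact ⟨by rw [hlen]; omega, by simpa using hpal⟩
  · rintro ⟨hne, hop, hsuf⟩
    obtain ⟨hodd, hpal⟩ := (oddPalB_iff x).mp hop
    have hlen_le : x.length ≤ i + 1 := by
      have h := hsuf.length_le; simp at h; omega
    have hpos : 0 < x.length := List.length_pos_of_ne_nil hne
    have hxT : x = TfL s i x.length := suffix_eq_TfL s i hi x hsuf
    refine ⟨i + 1 - x.length, by omega, by omega, by simpa using hpal, ?_⟩
    have hT : TfL s i x.length = segN s (i + 1 - x.length) (i + 1 - (i + 1 - x.length)) := by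
      rw [TfL, segN, List.drop_take]
    exact hxT.trans hT

theorem QR_iff (s : List Char) (k : Nat) (hk : k < s.length) (y : List Char) :
    QR s k y ↔ PreQ s k y := by
  constructor
  · rintro ⟨m, h1, h2, h3, rfl⟩
    have hlen : (segN s k (m - k)).length = m - k := length_segN s k _ (by omega)
    refine ⟨?_, ?_, ?_⟩
    · intro h; rw [h] at hlen; simp at hlen; omega
    · rw [← isPositive_eq_oddPalB]; exact h3
    · rw [segN]; exact List.take_prefix _ _
  · rintro ⟨hne, hop, hpre⟩
    have hyeq : y = (s.drop k).take y.length := List.prefix_iff_eq_take.mp hpre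
    have hylen : y.length ≤ s.length - k := by
      have h := hpre.length_le; simp at h; omega
    have hy1 : 0 < y.length := List.length_pos_of_ne_nil hne
    refine ⟨k + y.length, by omega, by omega, by rw [isPositive_eq_oddPalB]; exact hop, ?_⟩
    rw [segN, show k + y.length - k = y.length from by omega]
    exact hyeq

-- growing the window on the left: what is in take (r+1) but not take r ends at r
theorem SubL_succ (s : List Char) (r : Nat) (x : List Char) :
    SubL s (r + 1) x ↔ SubL s r x ∨ SufQ s r x := by
  constructor
  · rintro ⟨hne, hop, hinf⟩
    obtain ⟨pre, post, hy⟩ := hinf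
    cases post with
    | nil =>
      exact Or.inr ⟨hne, hop, ⟨pre, by simpa using hy⟩⟩
    | cons c cs =>
      left
      refine ⟨hne, hop, ?_⟩
      have hpre2 : pre ++ x <+: s.take (r + 1) := ⟨c :: cs, by simpa [List.append_assoc] using hy⟩
      have hlen : pre.length + x.length ≤ r := by
        have h := congrArg List.length hy
        simp at h
        omega
      have hpre3 : pre ++ x <+: s.take r := by
        rw [List.prefix_take_iff]
        exact ⟨hpre2.trans (List.take_prefix _ _), by simp; omega⟩
      exact (List.suffix_append pre x).isInfix.trans hpre3.isInfix
  · rintro (⟨hne, hop, hinf⟩ | ⟨hne, hop, hsuf⟩)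
    · exact ⟨hne, hop, hinf.trans (List.take_prefix_take_left (by omega)).isInfix⟩
    · exact ⟨hne, hop, hsuf.isInfix⟩

-- growing the window on the right: what is in drop k but not drop (k+1) starts at k
theorem SubR_succ (s : List Char) (k : Nat) (x : List Char) :
    SubR s k x ↔ SubR s (k + 1) x ∨ PreQ s k x := by
  constructor
  · rintro ⟨hne, hop, hinf⟩
    obtain ⟨pre, post, hy⟩ := hinf
    cases pre with
    | nil =>
      exact Or.inr ⟨hne, hop, ⟨post, by simpa using hy⟩⟩
    | cons c pre' =>
      left
      refine ⟨hne, hop, ⟨pre', post, ?_⟩⟩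
      have h := congrArg List.tail hy
      simpa [List.tail_drop] using h
  · rintro (⟨hne, hop, hinf⟩ | ⟨hne, hop, hpre⟩)
    · refine ⟨hne, hop, hinf.trans ?_⟩
      exact (List.tail_drop ▸ List.tail_suffix (s.drop k)).isInfix
    · exact ⟨hne, hop, hpre.isInfix⟩

-- properties of the initial L of B's left inner loop
theorem lInit_spec (i : Nat) : lInit i % 2 = 1 ∧ lInit i ≤ i + 1 ∧
    ∀ L, L % 2 = 1 → L ≤ i + 1 → L ≤ lInit i := by
  unfold lInit
  rcases Nat.mod_two_eq_zero_or_one (i + 1) with h | h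
  · rw [if_neg (by simp [h])]
    exact ⟨by omega, by omega, fun L hL1 hL2 => by omega⟩
  · rw [if_pos (by simp [h])]
    exact ⟨h, le_refl _, fun L _ hL2 => hL2⟩

-- B's left inner loop finds the longest odd palindromic suffix length
theorem bFindL_spec (s : List Char) (i : Nat) (hi : i < s.length) :
    ∀ L, L % 2 = 1 → L ≤ i + 1 →
      (bFindL s i L) % 2 = 1 ∧ 1 ≤ bFindL s i L ∧ bFindL s i L ≤ L ∧
      TfL s i (bFindL s i L) = (TfL s i (bFindL s i L)).reverse ∧
      (∀ L', L' % 2 = 1 → bFindL s i L < L' → L' ≤ L → TfL s i L' ≠ (TfL s i L').reverse) := by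
  intro L
  induction L using Nat.strong_induction_on with
  | _ L IH =>
    intro hodd hle
    by_cases hc : (¬ PySem.List.slice s (some ((i : Int) + 1 - (L : Int))) (some ((i : Int) + 1)) =
        pyRevL (PySem.List.slice s (some ((i : Int) + 1 - (L : Int))) (some ((i : Int) + 1))) ∧ 2 ≤ L)
    · rw [bFindL, if_pos hc]
      have hfail : TfL s i L ≠ (TfL s i L).reverse := by
        have h := hc.1
        rwa [slice_TfL s i L hle, pyRevL_eq] at h
      obtain ⟨p1, p2, p3, p4, p5⟩ := IH (L - 2) (by omega) (by omega) (by omega)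
      refine ⟨p1, p2, by omega, p4, ?_⟩
      intro L' ho hgt hle'
      rcases Nat.lt_or_ge (L - 2) L' with h | h
      · have hLL : L' = L := by omega
        rw [hLL]; exact hfail
      · exact p5 L' ho hgt h
    · rw [bFindL, if_neg hc]
      refine ⟨hodd, by omega, le_refl L, ?_, by intro L' _ h1 h2; omega⟩
      push_neg at hc
      by_cases hpal : PySem.List.slice s (some ((i : Int) + 1 - (L : Int))) (some ((i : Int) + 1)) =
          pyRevL (PySem.List.slice s (some ((i : Int) + 1 - (L : Int))) (some ((i : Int) + 1)))
      · rwa [slice_TfL s i L hle, pyRevL_eq] at hpal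
      · have hL1 : L = 1 := by have := hc hpal; omega
        subst hL1
        obtain ⟨a, ha⟩ := List.length_eq_one_iff.mp (TfL_length s i 1 hi (by omega))
        rw [ha]; rfl

def Lstar (s : List Char) (i : Nat) : Nat := bFindL s i (lInit i)
def Tstar (s : List Char) (i : Nat) : List Char := TfL s i (Lstar s i)

-- the key combinatorial fact: any odd palindromic suffix of s.take (i+1) other than
-- the longest one already occurs inside s.take i
theorem Tstar_spec (s : List Char) (i : Nat) (hi : i < s.length) :
    SufQ s i (Tstar s i) ∧ ∀ x, SufQ s i x → x ≠ Tstar s i → x <:+: s.take i := by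
  obtain ⟨hodd0, hle0, hmax0⟩ := lInit_spec i
  obtain ⟨hRodd, hR1, hRle, hRpal, hRmax⟩ := bFindL_spec s i hi (lInit i) hodd0 hle0
  have hLle : Lstar s i ≤ i + 1 := le_trans hRle hle0
  have hTlen : (Tstar s i).length = Lstar s i := TfL_length s i _ hi hLle
  have hTsuf : Tstar s i <:+ s.take (i + 1) := List.drop_suffix _ _
  have hTpal : Tstar s i = (Tstar s i).reverse := hRpal
  have hTQ : SufQ s i (Tstar s i) := by
    refine ⟨?_, ?_, hTsuf⟩
    · intro h; rw [h] at hTlen; simp at hTlen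
      have h1 : 1 ≤ Lstar s i := hR1
      omega
    · rw [oddPalB_iff]
      exact ⟨by rw [hTlen]; exact hRodd, hTpal⟩
  refine ⟨hTQ, ?_⟩
  intro x hx hne
  obtain ⟨hxne, hxop, hxsuf⟩ := hx
  obtain ⟨hxodd, hxpal⟩ := (oddPalB_iff x).mp hxop
  have hxlen_le : x.length ≤ i + 1 := by
    have h := hxsuf.length_le; simp at h; omega
  rcases Nat.lt_trichotomy x.length (Lstar s i) with hlt | heq | hgt
  · -- shorter: x is a prefix of Tstar, hence occurs earlier
    have hxsufT : x <:+ Tstar s i := List.suffix_of_suffix_length_le hxsuf hTsuf (by omega)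
    have hxpreT : x <+: Tstar s i := by
      have h1 : x.reverse <+: (Tstar s i).reverse := List.reverse_prefix.mpr hxsufT
      rwa [← hxpal, ← hTpal] at h1
    obtain ⟨w, hw⟩ := hxpreT
    have hsplit : (s.take (i + 1)).take (i + 1 - Lstar s i) ++ Tstar s i = s.take (i + 1) := by
      rw [Tstar, TfL]
      exact List.take_append_drop _ _
    have hfrontpre : (s.take (i + 1)).take (i + 1 - Lstar s i) ++ x <+: s.take (i + 1) :=
      ⟨w, by rw [List.append_assoc, hw, hsplit]⟩
    have hfront_len : ((s.take (i + 1)).take (i + 1 - Lstar s i) ++ x).length ≤ i := by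
      simp
      omega
    have hfront : (s.take (i + 1)).take (i + 1 - Lstar s i) ++ x <+: s.take i := by
      rw [List.prefix_take_iff]
      refine ⟨hfrontpre.trans (List.take_prefix _ _), ?_⟩
      have h := hfrontpre.length_le
      simp at h ⊢
      omega
    exact (List.suffix_append _ x).isInfix.trans hfront.isInfix
  · exact absurd ((suffix_eq_TfL s i hi x hxsuf).trans (by rw [heq]; rfl)) hne
  · exfalso
    have hxT : x = TfL s i x.length := suffix_eq_TfL s i hi x hxsuf
    exact hRmax x.length hxodd hgt (hmax0 x.length hxodd hxlen_le) (by rw [← hxT]; exact hxpal)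

-- the prefix of s[k:] of length q
def Pfx (s : List Char) (k q : Nat) : List Char := (s.drop k).take q

theorem Pfx_length (s : List Char) (k q : Nat) (h : q ≤ s.length - k) : (Pfx s k q).length = q := by
  unfold Pfx; simp; omega

theorem Pfx_mono (s : List Char) (k : Nat) {q' q : Nat} (h : q' ≤ q) {w : List Char}
    (hq : Pfx s k q <:+: w) : Pfx s k q' <:+: w := by
  have h1 : Pfx s k q' <+: Pfx s k q := by
    unfold Pfx
    rw [show (s.drop k).take q' = ((s.drop k).take q).take q' from by
      rw [List.take_take, Nat.min_eq_left h]]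
    exact List.take_prefix _ _
  exact h1.isInfix.trans hq

-- a substring of s[k:] that is not a substring of s[k+1:] is a prefix of s[k:]
theorem newR_prefix (s : List Char) (k : Nat) (y : List Char)
    (h1 : y <:+: s.drop k) (h2 : ¬ y <:+: s.drop (k + 1)) : y <+: s.drop k := by
  obtain ⟨pre, post, hy⟩ := h1
  cases pre with
  | nil => exact ⟨post, by simpa using hy⟩
  | cons c pre' =>
    exfalso
    apply h2
    refine ⟨pre', post, ?_⟩
    have h := congrArg List.tail hy
    simpa [List.tail_drop] using h

-- B's right inner while loop: its result m is maximal with s[k:k+m] reoccurring later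
theorem bWhileR_spec (s : List Char) (k : Nat) (hk : k < s.length) :
    ∀ (d m : Nat), s.length - (k + m) ≤ d →
      (∀ q, 1 ≤ q → q ≤ m → Pfx s k q <:+: s.drop (k + 1)) → k + m ≤ s.length →
      m ≤ bWhileR s k m ∧ k + bWhileR s k m ≤ s.length ∧
      (∀ q, 1 ≤ q → q ≤ bWhileR s k m → Pfx s k q <:+: s.drop (k + 1)) ∧
      (k + bWhileR s k m = s.length ∨ ¬ Pfx s k (bWhileR s k m + 1) <:+: s.drop (k + 1)) := by
  have hsl : ∀ m : Nat, PySem.List.slice s (some (k : Int)) (some ((k : Int) + (m : Int) + 1)) =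
      Pfx s k (m + 1) := by
    intro m
    rw [show (k : Int) + (m : Int) + 1 = (k : Int) + ((m + 1 : Nat) : Int) from by omega,
      PySem.List.slice_natCast_add]
    rfl
  have hdr : PySem.List.slice s (some ((k : Int) + 1)) none = s.drop (k + 1) := by
    rw [show (k : Int) + 1 = ((k + 1 : Nat) : Int) from by omega, PySem.List.slice_from_natCast]
  intro d
  induction d with
  | zero =>
    intro m hd hinv hle
    rw [bWhileR, dif_neg (by rintro ⟨h1, _⟩; omega)]
    exact ⟨le_refl m, hle, hinv, Or.inl (by omega)⟩
  | succ d IH =>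
    intro m hd hinv hle
    by_cases hcond : (k + m < s.length ∧ PySem.Chars.isIn
        (PySem.List.slice s (some (k : Int)) (some ((k : Int) + (m : Int) + 1)))
        (PySem.List.slice s (some ((k : Int) + 1)) none) = true)
    · rw [bWhileR, dif_pos hcond]
      have hnew : Pfx s k (m + 1) <:+: s.drop (k + 1) := by
        have h := hcond.2
        rw [hsl m, hdr] at h
        exact (PySem.Chars.isIn_iff_infix _ _).mp h
      have hinv' : ∀ q, 1 ≤ q → q ≤ m + 1 → Pfx s k q <:+: s.drop (k + 1) := by
        intro q h1 h2
        rcases Nat.lt_or_ge q (m + 1) with h | h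
        · exact hinv q h1 (by omega)
        · have hq : q = m + 1 := by omega
          rw [hq]; exact hnew
      obtain ⟨p1, p2, p3, p4⟩ := IH (m + 1) (by omega) hinv' (by omega)
      exact ⟨by omega, p2, p3, p4⟩
    · rw [bWhileR, dif_neg hcond]
      refine ⟨le_refl m, hle, hinv, ?_⟩
      rcases Nat.lt_or_ge (k + m) s.length with h | h
      · right
        intro hinf
        apply hcond
        refine ⟨h, ?_⟩
        rw [hsl m, hdr]
        exact (PySem.Chars.isIn_iff_infix _ _).mpr hinf
      · left; omega

-- the candidate new substrings at a right step: prefixes of s[k:] longer than m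
def newLens (s : List Char) (k m : Nat) : List Nat :=
  (List.range (s.length - k - m)).map (fun j => m + 1 + j)
def newSubs (s : List Char) (k m : Nat) : List (List Char) :=
  ((newLens s k m).filter (fun q => oddPalB (Pfx s k q) == false)).map (Pfx s k)

theorem mem_newLens (s : List Char) (k m q : Nat) :
    q ∈ newLens s k m ↔ m < q ∧ q ≤ s.length - k := by
  simp only [newLens, List.mem_map, List.mem_range]
  constructor
  · rintro ⟨j, hj, rfl⟩; omega
  · rintro ⟨h1, h2⟩; exact ⟨q - m - 1, by omega, by omega⟩

theorem mem_newSubs (s : List Char) (k m : Nat) (y : List Char) :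
    y ∈ newSubs s k m ↔ ∃ q, m < q ∧ q ≤ s.length - k ∧ oddPalB (Pfx s k q) = false ∧ y = Pfx s k q := by
  simp only [newSubs, List.mem_map, List.mem_filter]
  constructor
  · rintro ⟨q, ⟨hq, hcond⟩, rfl⟩
    obtain ⟨h1, h2⟩ := (mem_newLens s k m q).mp hq
    exact ⟨q, h1, h2, by simpa using hcond, rfl⟩
  · rintro ⟨q, h1, h2, h3, rfl⟩
    exact ⟨q, ⟨(mem_newLens s k m q).mpr ⟨h1, h2⟩, by simpa using h3⟩, rfl⟩

theorem newSubs_nodup (s : List Char) (k m : Nat) (hk : k ≤ s.length) : (newSubs s k m).Nodup := by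
  have hl : (newLens s k m).Nodup :=
    (List.nodup_range).map (fun a b h => by omega)
  apply (hl.filter _).map_on
  intro q hq q' hq' heq
  have h1 := (mem_newLens s k m q).mp (List.mem_filter.mp hq).1
  have h2 := (mem_newLens s k m q').mp (List.mem_filter.mp hq').1
  have := congrArg List.length heq
  rwa [Pfx_length s k q (by omega), Pfx_length s k q' (by omega)] at this

-- the exact set of new elements at a right step
theorem right_new_iff (s : List Char) (k : Nat) (hk : k < s.length) (m : Nat)
    (hmle : k + m ≤ s.length)
    (hinv : ∀ q, 1 ≤ q → q ≤ m → Pfx s k q <:+: s.drop (k + 1))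
    (hmax : k + m = s.length ∨ ¬ Pfx s k (m + 1) <:+: s.drop (k + 1)) (y : List Char) :
    (SubR s k y ∧ ¬ SubR s (k + 1) y) ↔ y ∈ newSubs s k m := by
  rw [mem_newSubs s k m y]
  constructor
  · rintro ⟨⟨hne, hop, hinf⟩, hnot⟩
    have hninf : ¬ y <:+: s.drop (k + 1) := fun h => hnot ⟨hne, hop, h⟩
    have hpre : y <+: s.drop k := newR_prefix s k y hinf hninf
    have hyeq : y = Pfx s k y.length := by
      unfold Pfx; exact List.prefix_iff_eq_take.mp hpre
    have hylen : y.length ≤ s.length - k := by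
      have h := hpre.length_le; simp at h; omega
    have hy1 : 0 < y.length := List.length_pos_of_ne_nil hne
    have hgt : m < y.length := by
      by_contra h
      exact hninf (by rw [hyeq]; exact hinv y.length hy1 (by omega))
    exact ⟨y.length, hgt, hylen, by rw [← hyeq]; exact hop, hyeq⟩
  · rintro ⟨q, hq1, hq2, hqop, rfl⟩
    have hlen : (Pfx s k q).length = q := Pfx_length s k q hq2
    have hne : Pfx s k q ≠ [] := by
      intro h; rw [h] at hlen; simp at hlen; omega
    refine ⟨⟨hne, hqop, (List.take_prefix _ _).isInfix⟩, ?_⟩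
    rintro ⟨_, _, hinf⟩
    have hm1 : Pfx s k (m + 1) <:+: s.drop (k + 1) := Pfx_mono s k (by omega) hinf
    rcases hmax with h | h
    · omega
    · exact h hm1

-- B's right inner for-loop counts exactly the new non-odd-palindromes
theorem stepBR_count (s : List Char) (k m : Nat) (hk : k ≤ s.length) (hm : m ≤ s.length - k) (t0 : Int) :
    (PySem.List.pyRange ((m : Int) + 1) ((s.length : Int) - (k : Int) + 1) 1).foldl
      (fun tot q =>
        if (PySem.Int.mod q 2 == 0 ||
            !(PySem.List.slice s (some (k : Int)) (some ((k : Int) + q)) ==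
              pyRevL (PySem.List.slice s (some (k : Int)) (some ((k : Int) + q))))) = true
        then tot + 1 else tot) t0
    = t0 + ((newSubs s k m).length : Int) := by
  rw [PySem.List.foldl_count_if]
  congr 1
  rw [PySem.List.pyRange_one,
    show ((s.length : Int) - (k : Int) + 1 - ((m : Int) + 1)).toNat = s.length - k - m from by omega,
    List.countP_map]
  have hlen : (newSubs s k m).length = (List.range (s.length - k - m)).countP
      (fun j => oddPalB (Pfx s k (m + 1 + j)) == false) := by
    rw [newSubs, List.length_map, ← List.countP_eq_length_filter, newLens, List.countP_map]
    rfl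
  rw [hlen]
  refine congrArg Nat.cast (List.countP_congr ?_)
  intro j hj
  rw [List.mem_range] at hj
  simp only [Function.comp_apply]
  have hsl : PySem.List.slice s (some (k : Int)) (some ((k : Int) + ((m : Int) + 1 + (j : Int)))) =
      Pfx s k (m + 1 + j) := by
    rw [show (k : Int) + ((m : Int) + 1 + (j : Int)) = (k : Int) + ((m + 1 + j : Nat) : Int) from by omega,
      PySem.List.slice_natCast_add]
    rfl
  have hmod : PySem.Int.mod ((m : Int) + 1 + (j : Int)) 2 = (((m + 1 + j) % 2 : Nat) : Int) := by
    rw [PySem.Int.mod_eq_emod_of_pos (by norm_num)]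
    omega
  have hPlen : (Pfx s k (m + 1 + j)).length = m + 1 + j := Pfx_length s k (m + 1 + j) (by omega)
  rw [hsl, pyRevL_eq, hmod]
  by_cases hp : Pfx s k (m + 1 + j) = (Pfx s k (m + 1 + j)).reverse
  · have hb : (Pfx s k (m + 1 + j) == (Pfx s k (m + 1 + j)).reverse) = true := by
      rw [beq_iff_eq]; exact hp
    rcases Nat.mod_two_eq_zero_or_one (m + 1 + j) with h2 | h2 <;> simp [oddPalB, hPlen, h2, hb]
  · have hb : (Pfx s k (m + 1 + j) == (Pfx s k (m + 1 + j)).reverse) = false := by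
      rw [beq_eq_false_iff_ne]; exact hp
    rcases Nat.mod_two_eq_zero_or_one (m + 1 + j) with h2 | h2 <;> simp [oddPalB, hPlen, h2, hb]

-- elements appended to a Nodup list are exactly the members not already present
theorem mem_append_part {l1 ex : List (List Char)} (hnd : (l1 ++ ex).Nodup) (x : List Char) :
    x ∈ ex ↔ x ∈ l1 ++ ex ∧ x ∉ l1 := by
  constructor
  · intro hx
    refine ⟨List.mem_append.mpr (Or.inr hx), fun hmem => ?_⟩
    exact (List.nodup_append.mp hnd).2.2 x hmem x hx rfl
  · rintro ⟨h1, h2⟩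
    rcases List.mem_append.mp h1 with h | h
    · exact absurd h h2
    · exact h

theorem set_replicate_last (m : Nat) (c : Int) :
    (List.replicate (m + 1) (0 : Int)).set m c = List.replicate m 0 ++ [c] := by
  induction m with
  | zero => rfl
  | succ m IH =>
    rw [List.replicate_succ, List.set]
    rw [IH, List.replicate_succ, List.cons_append]

-- the outer folds, as named partial computations
def foldA (s : List Char) (left : Bool) (l : List Nat) : PySem.Set (List Char) × List Int :=
  l.foldl (fun (st : PySem.Set (List Char) × List Int) i =>
    let s1 := genSideWhile s left i (i : Int) st.1
    (s1, st.2 ++ [(s1.length : Int)])) (PySem.Set.empty, [])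

def foldBL (s : List Char) (l : List Nat) : Int × List Int := l.foldl (stepBL s) (0, [])

def foldBR (s : List Char) (l : List Nat) : Int × List Int :=
  l.foldl (stepBR s) (0, List.replicate s.length (0 : Int))

theorem foldA_succ (s : List Char) (left : Bool) (r : Nat) :
    foldA s left (List.range (r + 1)) =
      (genSideWhile s left r (r : Int) (foldA s left (List.range r)).1,
        (foldA s left (List.range r)).2 ++
          [((genSideWhile s left r (r : Int) (foldA s left (List.range r)).1).length : Int)]) := by
  rw [foldA, List.range_succ, List.foldl_append]
  rfl

theorem foldBL_succ (s : List Char) (r : Nat) :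
    foldBL s (List.range (r + 1)) = stepBL s (foldBL s (List.range r)) r := by
  rw [foldBL, List.range_succ, List.foldl_append]
  rfl

theorem foldBR_succ (s : List Char) (r : Nat) (h : r < s.length) :
    foldBR s ((List.range s.length).reverse.take (r + 1)) =
      stepBR s (foldBR s ((List.range s.length).reverse.take r)) (s.length - 1 - r) := by
  rw [List.take_add_one, List.getElem?_reverse (by simpa using h)]
  simp only [List.length_range]
  rw [show (List.range s.length)[s.length - 1 - r]? = some (s.length - 1 - r) from by
    have hlt : s.length - 1 - r < s.length := by omega
    simp [List.getElem?_range, hlt]]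
  rw [foldBR, foldBR, List.foldl_append]
  rfl

-- LEFT: A's set-based fold and B's counting fold agree after the first r steps
theorem left_main (s : List Char) : ∀ r, r ≤ s.length →
    (foldA s true (List.range r)).1.Nodup ∧
    (∀ x, x ∈ (foldA s true (List.range r)).1 ↔ SubL s r x) ∧
    (foldBL s (List.range r)).1 = ((foldA s true (List.range r)).1.length : Int) ∧
    (foldA s true (List.range r)).2 = (foldBL s (List.range r)).2 := by
  intro r
  induction r with
  | zero =>
    intro _
    refine ⟨by simp [foldA, PySem.Set.empty], ?_, by simp [foldA, foldBL, PySem.Set.empty],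
      by simp [foldA, foldBL]⟩
    intro x
    constructor
    · intro hx; exact absurd hx (by simp [foldA, PySem.Set.empty])
    · rintro ⟨hne, _, hinf⟩
      rw [List.take_zero] at hinf
      exact absurd (by simpa using hinf) hne
  | succ r IH =>
    intro hr
    have hrlt : r < s.length := by omega
    obtain ⟨hAn, hM, hBt, hArr⟩ := IH (by omega)
    rw [foldA_succ, foldBL_succ]
    set S := foldA s true (List.range r) with hS
    set Bst := foldBL s (List.range r) with hBst
    obtain ⟨hAn', hAm'⟩ := genSideWhile_spec s true r (r + 1) (r : Int) S.1 (by omega) hAn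
    obtain ⟨ex, hex⟩ := genSideWhile_append s true r (r + 1) (r : Int) S.1 (by omega)
    have hmem' : ∀ x, x ∈ genSideWhile s true r (r : Int) S.1 ↔ SubL s (r + 1) x := by
      intro x
      rw [hAm' x, hM x, SubL_succ]
      apply or_congr Iff.rfl
      rw [← QL_iff s r hrlt x, ← stepA_left_mem s r hrlt x]
      constructor
      · rintro ⟨jj, h0, h1, h2, h3, h4⟩; exact ⟨jj, h0, h1, h2 rfl, h3, h4⟩
      · rintro ⟨jj, h0, h1, h2, h3, h4⟩; exact ⟨jj, h0, h1, fun _ => h2, h3, h4⟩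
    have hnd2 : (S.1 ++ ex).Nodup := by rw [← hex]; exact hAn'
    have hexmem : ∀ x, x ∈ ex ↔ (SubL s (r + 1) x ∧ ¬ SubL s r x) := by
      intro x
      rw [mem_append_part hnd2 x, ← hex, hmem' x, hM x]
    -- B's step: its slice is Tstar, its membership test is 'Tstar occurs in s.take r'
    obtain ⟨hodd0, hle0, _⟩ := lInit_spec r
    obtain ⟨_, _, hRle, _, _⟩ := bFindL_spec s r hrlt (lInit r) hodd0 hle0
    have hLle : bFindL s r (lInit r) ≤ r + 1 := le_trans hRle hle0
    have hTeq : PySem.List.slice s (some ((r : Int) + 1 - ((bFindL s r (lInit r)) : Int)))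
        (some ((r : Int) + 1)) = Tstar s r := by
      rw [slice_TfL s r (bFindL s r (lInit r)) hLle]; rfl
    have hstep : stepBL s Bst r =
        (if PySem.Chars.isIn (Tstar s r) (s.take r) = true then Bst.1 else Bst.1 + 1,
         Bst.2 ++ [if PySem.Chars.isIn (Tstar s r) (s.take r) = true then Bst.1 else Bst.1 + 1]) := by
      simp only [stepBL]
      rw [hTeq, PySem.List.slice_to_natCast]
    by_cases hT : Tstar s r <:+: s.take r
    · have hcT : PySem.Chars.isIn (Tstar s r) (s.take r) = true :=
        (PySem.Chars.isIn_iff_infix _ _).mpr hT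
      have hstep' : stepBL s Bst r = (Bst.1, Bst.2 ++ [Bst.1]) := by rw [hstep, if_pos hcT]
      have hexnil : ex = [] := by
        rw [List.eq_nil_iff_forall_not_mem]
        intro x hx
        obtain ⟨h1, h2⟩ := (hexmem x).mp hx
        have hQ : SufQ s r x := by
          rcases (SubL_succ s r x).mp h1 with h | h
          · exact absurd h h2
          · exact h
        by_cases hxT : x = Tstar s r
        · exact h2 ⟨hQ.1, hQ.2.1, by rw [hxT]; exact hT⟩
        · exact h2 ⟨hQ.1, hQ.2.1, (Tstar_spec s r hrlt).2 x hQ hxT⟩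
      have hlen' : (genSideWhile s true r (r : Int) S.1).length = S.1.length := by
        rw [hex, hexnil]; simp
      refine ⟨hAn', hmem', ?_, ?_⟩
      · rw [hstep', hlen', hBt]
      · rw [hstep', hlen', hArr, hBt]
    · have hcT : PySem.Chars.isIn (Tstar s r) (s.take r) = false :=
        (PySem.Chars.isIn_eq_false_iff _ _).mpr hT
      have hstep' : stepBL s Bst r = (Bst.1 + 1, Bst.2 ++ [Bst.1 + 1]) := by
        rw [hstep, if_neg (by rw [hcT]; simp)]
      have hexsing : ∀ x, x ∈ ex ↔ x ∈ [Tstar s r] := by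
        intro x
        rw [List.mem_singleton, hexmem x]
        constructor
        · rintro ⟨h1, h2⟩
          have hQ : SufQ s r x := by
            rcases (SubL_succ s r x).mp h1 with h | h
            · exact absurd h h2
            · exact h
          by_contra hxT
          exact h2 ⟨hQ.1, hQ.2.1, (Tstar_spec s r hrlt).2 x hQ hxT⟩
        · rintro rfl
          obtain ⟨hQ, _⟩ := Tstar_spec s r hrlt
          refine ⟨(SubL_succ s r _).mpr (Or.inr hQ), ?_⟩
          rintro ⟨_, _, hinf⟩
          exact hT hinf
      have hexnd : ex.Nodup := (List.nodup_append.mp hnd2).2.1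
      have hexlen : ex.length = 1 := by
        have h := length_eq_of_mem_iff hexnd
          (by simp : ([Tstar s r] : List (List Char)).Nodup) hexsing
        simpa using h
      have hlen' : (genSideWhile s true r (r : Int) S.1).length = S.1.length + 1 := by
        rw [hex, List.length_append, hexlen]
      refine ⟨hAn', hmem', ?_, ?_⟩
      · rw [hstep', hlen', hBt]; push_cast; ring
      · rw [hstep', hlen', hArr, hBt]; push_cast; ring_nf

-- RIGHT: A's fold on s.reverse and B's counting fold over descending start indices
theorem right_main (s : List Char) : ∀ r, r ≤ s.length →
    (foldA s.reverse false (List.range r)).1.Nodup ∧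
    (∀ x, x ∈ (foldA s.reverse false (List.range r)).1 ↔ SubR s (s.length - r) x.reverse) ∧
    (foldBR s ((List.range s.length).reverse.take r)).1 =
      ((foldA s.reverse false (List.range r)).1.length : Int) ∧
    (foldBR s ((List.range s.length).reverse.take r)).2 =
      List.replicate (s.length - r) 0 ++ ((foldA s.reverse false (List.range r)).2).reverse := by
  intro r
  induction r with
  | zero =>
    intro _
    refine ⟨by simp [foldA, PySem.Set.empty], ?_, by simp [foldA, foldBR, PySem.Set.empty],
      by simp [foldA, foldBR]⟩
    intro x
    constructor
    · intro hx; exact absurd hx (by simp [foldA, PySem.Set.empty])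
    · rintro ⟨hne, _, hinf⟩
      rw [Nat.sub_zero, List.drop_length] at hinf
      exact absurd (List.reverse_eq_nil_iff.mp (by simpa using hinf)) hne
  | succ r IH =>
    intro hr
    have hrn : r < s.length := by omega
    obtain ⟨hAn, hM, hBt, hArr⟩ := IH (by omega)
    rw [foldA_succ, foldBR_succ s r hrn]
    set k := s.length - 1 - r with hkdef
    have hk1 : s.length - r = k + 1 := by omega
    have hk2 : s.length - (r + 1) = k := by omega
    have hkn : k < s.length := by omega
    set S := foldA s.reverse false (List.range r) with hS
    set Bst := foldBR s ((List.range s.length).reverse.take r) with hBst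
    obtain ⟨hAn', hAm'⟩ := genSideWhile_spec s.reverse false r (r + 1) (r : Int) S.1 (by omega) hAn
    obtain ⟨ex, hex⟩ := genSideWhile_append s.reverse false r (r + 1) (r : Int) S.1 (by omega)
    have hmem' : ∀ x, x ∈ genSideWhile s.reverse false r (r : Int) S.1 ↔ SubR s k x.reverse := by
      intro x
      rw [hAm' x, SubR_succ s k x.reverse]
      apply or_congr
      · rw [hM x, hk1]
      · have h1 := stepA_right_mem s r hrn x
        rw [← hkdef] at h1
        rw [← QR_iff s k hkn x.reverse, ← h1]
        constructor
        · rintro ⟨jj, h0, hle', h2, h3, h4⟩; exact ⟨jj, h0, hle', h3, h4⟩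
        · rintro ⟨jj, h0, hle', h3, h4⟩
          exact ⟨jj, h0, hle', fun hf => absurd hf (by simp), h3, h4⟩
    have hnd2 : (S.1 ++ ex).Nodup := by rw [← hex]; exact hAn'
    have hexmem : ∀ x, x ∈ ex ↔ (SubR s k x.reverse ∧ ¬ SubR s (k + 1) x.reverse) := by
      intro x
      rw [mem_append_part hnd2 x, ← hex, hmem' x]
      have hMx : x ∈ S.1 ↔ SubR s (k + 1) x.reverse := by rw [hM x, hk1]
      rw [hMx]
    set m := bWhileR s k 0 with hmdef
    obtain ⟨hm0, hmle, hminv, hmmax⟩ := bWhileR_spec s k hkn s.length 0 (by omega)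
      (by intro q hq1 hq2; omega) (by omega)
    rw [← hmdef] at hm0 hmle hminv hmmax
    have hexsubs : ∀ x, x ∈ ex ↔ x.reverse ∈ newSubs s k m := by
      intro x
      rw [hexmem x]
      exact right_new_iff s k hkn m hmle hminv hmmax x.reverse
    have hexnd : ex.Nodup := (List.nodup_append.mp hnd2).2.1
    have hexlen : ex.length = (newSubs s k m).length :=
      length_eq_of_mem_rev_iff hexnd (newSubs_nodup s k m (by omega)) hexsubs
    have hlen' : (genSideWhile s.reverse false r (r : Int) S.1).length =
        S.1.length + (newSubs s k m).length := by
      rw [hex, List.length_append, hexlen]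
    have hstep : stepBR s Bst k =
        (Bst.1 + ((newSubs s k m).length : Int),
         Bst.2.set k (Bst.1 + ((newSubs s k m).length : Int))) := by
      simp only [stepBR]
      rw [← hmdef, stepBR_count s k m (by omega) (by omega) Bst.1]
    refine ⟨hAn', ?_, ?_, ?_⟩
    · intro x; rw [hk2]; exact hmem' x
    · rw [hstep, hlen', hBt]; push_cast; ring
    · rw [hstep]
      show Bst.2.set k (Bst.1 + ((newSubs s k m).length : Int)) = _
      rw [hArr, hk1, hk2]
      have hset : (List.replicate (k + 1) (0 : Int) ++ (S.2).reverse).set k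
          (Bst.1 + ((newSubs s k m).length : Int)) =
          (List.replicate (k + 1) (0 : Int)).set k (Bst.1 + ((newSubs s k m).length : Int)) ++
            (S.2).reverse := by
        rw [List.set_append, if_pos (by simp)]
      rw [hset, set_replicate_last k _, List.append_assoc]
      congr 1
      rw [List.reverse_append]
      simp only [List.reverse_cons, List.reverse_nil, List.nil_append, List.singleton_append]
      congr 2
      rw [hBt, hlen']
      push_cast
      ring

-- ===== VERDICT (by name: the statement is the Claim_ definition above) =====
theorem genSide_spec : Claim_equal_genSide := by
  intro string left _
  unfold Spec_genSide
  cases left with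
  | true =>
    show (foldA string.toList true (List.range string.toList.length)).2 =
      (foldBL string.toList (List.range string.toList.length)).2
    exact (left_main string.toList string.toList.length le_rfl).2.2.2
  | false =>
    have hA : genSide string false =
        pyRevL (foldA (pyRevL string.toList) false (List.range (pyRevL string.toList).length)).2 := rfl
    have hB : genSide_alt string false =
        (foldBR string.toList (List.range string.toList.length).reverse).2 := rfl
    rw [hA, hB, pyRevL_eq string.toList, List.length_reverse]
    obtain ⟨_, _, _, h⟩ := right_main string.toList string.toList.length le_rfl
    rw [List.take_of_length_le (by simp)] at h
    rw [h, Nat.sub_self]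
    simp [pyRevL_eq]
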